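-- pv_equiv track=rewrite | github.com/jgfranco/formation | 2024_05/activeDeliveryTime.py | activeDeliveryTime2
-- ===== SOURCE A (Python) =====
-- def activeDeliveryTime2(events):
--
--   tracker = set()
--   startTime = None
--   TotalActiveTime = 0
--
--   for event in events:
--     orderNumber, timestamp, eventType = event
--     if eventType == 0 and orderNumber not in tracker: #pickup
--       if len(tracker) == 0:
--         startTime = timestamp
--       tracker.add(orderNumber)
--
--     elif eventType == 1 and orderNumber in tracker:
--       if len(tracker) == 1:
--         TotalActiveTime += timestamp -  startTime
--       tracker.remove(orderNumber)
--
--   return TotalActiveTime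
-- ===== SOURCE B (Python) =====
-- def activeDeliveryTime2(events):
--     # Gap accumulation: sum timestamp gaps while any order is active; 'committed'
--     # snapshots the total whenever the active set is empty, so an unfinished
--     # run at the end of the log is not counted (same as A).
--     active = set()
--     prev = 0
--     total = 0
--     committed = 0
--     for orderNumber, timestamp, eventType in events:
--         if active:
--             total += timestamp - prev
--         if eventType == 0:
--             active.add(orderNumber)
--         elif eventType == 1:
--             active.discard(orderNumber)
--         if not active:
--             committed = total
--         prev = timestamp
--     return committed
-- ===== Notes on version B (the rewrite author's own statement) =====
-- stated objective: alternative
-- what changed: Replaces A's start-time bookkeeping with its len(tracker)==0 / len(tracker)==1 edge-detection branches by uniform per-event gap accumulation (total += timestamp - prev whenever any order is active) plus a 'committed' snapshot taken whenever the active set is empty, which telescopes to the same sum of closed active intervals.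
import Mathlib
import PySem

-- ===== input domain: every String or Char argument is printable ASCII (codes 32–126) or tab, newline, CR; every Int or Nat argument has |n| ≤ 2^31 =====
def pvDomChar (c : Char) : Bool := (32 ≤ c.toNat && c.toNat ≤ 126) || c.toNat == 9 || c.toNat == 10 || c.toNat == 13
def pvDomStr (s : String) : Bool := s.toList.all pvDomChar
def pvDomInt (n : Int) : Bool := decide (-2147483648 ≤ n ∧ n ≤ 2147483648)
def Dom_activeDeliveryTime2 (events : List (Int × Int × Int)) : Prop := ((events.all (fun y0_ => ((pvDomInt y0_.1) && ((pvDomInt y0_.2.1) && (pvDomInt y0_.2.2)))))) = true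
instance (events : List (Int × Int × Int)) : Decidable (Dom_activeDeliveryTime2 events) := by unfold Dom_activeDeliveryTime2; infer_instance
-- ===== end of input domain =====

-- B replaces A's start-time bookkeeping and len==0 / len==1 edge checks by uniform
-- per-event gap accumulation with a 'committed' snapshot taken whenever the active
-- set is empty (objective: alternative decomposition, same cost).

-- ===== PORT A =====
-- helper: the body of A's `for event in events` loop; state = (tracker, startTime, TotalActiveTime)
def pvStepA (st : PySem.Set Int × Option Int × Int) (ev : Int × Int × Int) :
    PySem.Set Int × Option Int × Int :=
  match st, ev with
  | (tracker, startTime, total), (orderNumber, timestamp, eventType) =>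
    if eventType = 0 ∧ ¬ tracker.contains orderNumber then      -- pickup
      (tracker.add orderNumber,
       if PySem.Set.len tracker = 0 then some timestamp else startTime,
       total)
    else if eventType = 1 ∧ tracker.contains orderNumber then
      -- `tracker.remove(orderNumber)`: the guard guarantees membership, so remove = discard (exact);
      -- `timestamp - startTime`: whenever len(tracker)==1, startTime has been set, so `.getD 0` never applies
      (tracker.discard orderNumber,
       startTime,
       if PySem.Set.len tracker = 1 then total + (timestamp - startTime.getD 0) else total)
    else (tracker, startTime, total)

def activeDeliveryTime2 (events : List (Int × Int × Int)) : Int :=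
  (events.foldl pvStepA (PySem.Set.empty, none, 0)).2.2

-- ===== PORT B =====
-- helper: the body of B's loop; state = (active, prev, total, committed)
def pvStepB (st : PySem.Set Int × Int × Int × Int) (ev : Int × Int × Int) :
    PySem.Set Int × Int × Int × Int :=
  match st, ev with
  | (active, prev, total, committed), (orderNumber, timestamp, eventType) =>
    let total := if active = [] then total else total + (timestamp - prev)   -- if active: total += timestamp - prev
    let active := if eventType = 0 then active.add orderNumber
                  else if eventType = 1 then active.discard orderNumber
                  else active
    let committed := if active = [] then total else committed                -- if not active: committed = total
    (active, timestamp, total, committed)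

def activeDeliveryTime2_alt (events : List (Int × Int × Int)) : Int :=
  (events.foldl pvStepB (PySem.Set.empty, 0, 0, 0)).2.2.2

-- ===== PRECONDITION & SPEC =====
def Spec_activeDeliveryTime2 (events : List (Int × Int × Int)) (out : Int) : Prop := out = activeDeliveryTime2_alt events
instance (events : List (Int × Int × Int)) (out : Int) : Decidable (Spec_activeDeliveryTime2 events out) := by unfold Spec_activeDeliveryTime2; infer_instance

-- ===== CLAIM (what is proved, stated in full; the proofs are below) =====
def Claim_equal_activeDeliveryTime2 : Prop := ∀ (events : List (Int × Int × Int)), Dom_activeDeliveryTime2 events → Spec_activeDeliveryTime2 events (activeDeliveryTime2 events)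

-- ===== LEMMAS AND PROOFS =====

-- coupling invariant between A's loop state and B's loop state
def pvInv (a : PySem.Set Int × Option Int × Int) (b : PySem.Set Int × Int × Int × Int) : Prop :=
  b.1 = a.1 ∧ a.1.Nodup ∧ b.2.2.2 = a.2.2 ∧
  (a.1 = [] → b.2.2.1 = a.2.2) ∧
  (a.1 ≠ [] → ∃ s, a.2.1 = some s ∧ b.2.2.1 = a.2.2 + (b.2.1 - s))

lemma pv_add_nodup {s : PySem.Set Int} (h : s.Nodup) (x : Int) : (PySem.Set.add s x).Nodup := by
  simp only [PySem.Set.add]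
  split
  · exact h
  · rename_i hc
    have hx : x ∉ s := by simpa [PySem.Set.contains] using hc
    simp [List.nodup_append, h]
    exact fun a ha hax => hx (hax ▸ ha)

lemma pv_discard_not_mem {s : PySem.Set Int} {x : Int} (h : ¬ s.contains x) :
    PySem.Set.discard s x = s := by
  have hx : x ∉ s := by simpa [PySem.Set.contains] using h
  simp only [PySem.Set.discard]
  apply List.filter_eq_self.mpr
  intro a ha
  simp only [Bool.not_eq_true', beq_eq_false_iff_ne, ne_eq]
  rintro rfl
  exact hx ha

lemma pv_discard_nodup {s : PySem.Set Int} (h : s.Nodup) (x : Int) :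
    (PySem.Set.discard s x).Nodup := by
  simp only [PySem.Set.discard]
  exact h.filter _

lemma pv_discard_ne_nil {s : PySem.Set Int} {x : Int} (hnd : s.Nodup)
    (hc : s.contains x) (hl : s.length ≠ 1) : PySem.Set.discard s x ≠ [] := by
  simp only [PySem.Set.contains, List.contains_eq_mem, decide_eq_true_eq] at hc
  simp only [PySem.Set.discard]
  -- s has ≥ 2 elements and no duplicates, so some element ≠ x survives the filter
  obtain ⟨a, b, ha, hb, hab⟩ : ∃ a b, a ∈ s ∧ b ∈ s ∧ a ≠ b := by
    rcases s with _ | ⟨a, _ | ⟨b, tl⟩⟩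
    · simp at hc
    · simp at hl
    · refine ⟨a, b, by simp, by simp, ?_⟩
      intro h'; subst h'
      simp [List.nodup_cons] at hnd
    
  have : ∃ c, c ∈ s ∧ c ≠ x := by
    by_cases hax : a = x
    · exact ⟨b, hb, by rw [← hax]; exact fun h => hab h.symm⟩
    · exact ⟨a, ha, hax⟩
  obtain ⟨c, hcs, hcx⟩ := this
  intro hnil
  have : c ∈ List.filter (fun y => !y == x) s := by
    simp only [List.mem_filter]
    exact ⟨hcs, by simp [hcx]⟩
  rw [hnil] at this
  simp at this

lemma pvStep_inv (a : PySem.Set Int × Option Int × Int) (b : PySem.Set Int × Int × Int × Int)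
    (ev : Int × Int × Int) (h : pvInv a b) : pvInv (pvStepA a ev) (pvStepB b ev) := by
  obtain ⟨tr, st, totA⟩ := a
  obtain ⟨act, prev, totB, com⟩ := b
  obtain ⟨o, t, e⟩ := ev
  obtain ⟨h1, hnd, h2, h3, h4⟩ := h
  simp only at h1 hnd h2 h3 h4
  subst h1 h2
  simp only [pvStepA, pvStepB, pvInv]
  by_cases htr : act = []
  · -- tracker empty before this event: A's total and B's committed stay put
    subst htr
    have h30 := h3 rfl
    by_cases he0 : e = 0
    · -- pickup into empty set: run opens at t
      subst he0
      simp [PySem.Set.contains, PySem.Set.len, PySem.Set.add, h30]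
    · by_cases he1 : e = 1
      · subst he1
        simp [PySem.Set.contains, PySem.Set.discard, h30, he0]
      · simp [he0, he1, PySem.Set.contains, h30]
  · -- tracker nonempty: startTime is some s and B's total runs ahead by prev - s
    obtain ⟨s, hst, htot⟩ := h4 htr
    subst hst htot
    have hlen0 : ¬ PySem.Set.len act = 0 := by
      simp [PySem.Set.len, List.length_eq_zero_iff, htr]
    by_cases hmem : o ∈ act
    · have hcb : PySem.Set.contains act o = true := by
        simp [PySem.Set.contains, hmem]
      by_cases he0 : e = 0
      · -- already-tracked pickup: A no-op, B's add is the identity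
        subst he0
        simp [hmem, htr, hnd]
        omega
      · by_cases he1 : e = 1
        · subst he1
          by_cases hl : act.length = 1
          · -- last order dropped: run closes, A adds t - s, B commits its total
            obtain ⟨y, hy⟩ := List.length_eq_one_iff.mp hl
            have hoy : o = y := by rw [hy] at hmem; simpa using hmem
            have hd : PySem.Set.discard act o = [] := by
              rw [hy, hoy]; simp [PySem.Set.discard]
            have hlI : PySem.Set.len act = 1 := by simp [PySem.Set.len, hl]
            simp [hmem, he0, hd, hl, htr]
            omega
          · -- one of several orders dropped: set stays nonempty
            have hne := pv_discard_ne_nil hnd hcb hl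
            simp [hmem, he0, hl, hne, pv_discard_nodup hnd, htr]
            omega
        · -- other event type: both keep the set
          simp [he0, he1, htr, hnd]
          omega
    · by_cases he0 : e = 0
      · -- new order into nonempty set: startTime kept
        subst he0
        simp [hmem, htr]
        refine ⟨?_, by omega⟩
        have := pv_add_nodup hnd o
        simpa [PySem.Set.add, PySem.Set.contains, hmem] using this
      · by_cases he1 : e = 1
        · -- dropoff for an untracked order: both no-ops on the set
          subst he1
          have hd := pv_discard_not_mem (s := act) (x := o)
            (by simp [PySem.Set.contains, hmem])
          simp [hmem, he0, hd, htr, hnd]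
          omega
        · simp [he0, he1, htr, hnd]
          omega

lemma pv_foldl_inv (l : List (Int × Int × Int)) :
    ∀ (a : PySem.Set Int × Option Int × Int) (b : PySem.Set Int × Int × Int × Int),
      pvInv a b → pvInv (l.foldl pvStepA a) (l.foldl pvStepB b) := by
  induction l with
  | nil => intro a b h; exact h
  | cons ev tl ih =>
      intro a b h
      exact ih _ _ (pvStep_inv a b ev h)

-- ===== VERDICT (by name: the statement is the Claim_ definition above) =====
theorem activeDeliveryTime2_spec : Claim_equal_activeDeliveryTime2 := by
  intro events _
  unfold Spec_activeDeliveryTime2 activeDeliveryTime2 activeDeliveryTime2_alt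
  have h0 : pvInv (PySem.Set.empty, none, 0) (PySem.Set.empty, 0, 0, 0) := by
    refine ⟨rfl, by simp [PySem.Set.empty], rfl, fun _ => rfl, fun h => absurd rfl h⟩
  have := pv_foldl_inv events _ _ h0
  exact (this.2.2.1).symm
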